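-- pv_equiv track=rewrite | github.com/A1M918/rag-quiz-app | __helpers.py | is_noise
-- ===== SOURCE A (Python) =====
-- def is_noise(text: str) -> bool:
--     noise_markers = [
--         "thank you for downloading",
--         "disclaimer",
--         "introduction",
--         "email",
--         "www.",
--         "http",
--         "copyright",
--     ]
--     t = text.lower()
--     return any(m in t for m in noise_markers)
-- ===== SOURCE B (Python) =====
-- _MARKERS = (
--     "thank you for downloading",
--     "disclaimer",
--     "introduction",
--     "email",
--     "www.",
--     "http",
--     "copyright",
-- )
--
-- def is_noise(text: str) -> bool:
--     t = text.lower()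
--     for i in range(len(t)):
--         for m in _MARKERS:
--             if t.startswith(m, i):
--                 return True
--     return False
-- ===== Notes on version B (the rewrite author's own statement) =====
-- stated objective: alternative
-- what changed: B replaces A's marker-by-marker membership loop with a single left-to-right scan over text positions, testing at each position whether any marker starts there.
import Mathlib
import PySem

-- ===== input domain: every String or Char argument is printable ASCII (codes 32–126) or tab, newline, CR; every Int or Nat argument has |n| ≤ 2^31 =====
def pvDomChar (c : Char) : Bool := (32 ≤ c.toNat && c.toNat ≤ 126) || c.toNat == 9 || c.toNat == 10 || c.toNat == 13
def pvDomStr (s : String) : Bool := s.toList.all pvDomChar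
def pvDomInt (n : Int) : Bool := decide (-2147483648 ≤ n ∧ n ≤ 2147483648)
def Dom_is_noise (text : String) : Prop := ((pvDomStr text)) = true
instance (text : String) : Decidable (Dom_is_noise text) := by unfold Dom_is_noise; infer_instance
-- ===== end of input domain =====

-- B replaces A's marker-by-marker substring loop with one left-to-right scan over text
-- positions, testing at each position whether any marker starts there (alternative, same cost).


-- the shared marker list (the same literal list in A and in B)
def noiseMarkers : List String :=
  ["thank you for downloading", "disclaimer", "introduction", "email",
   "www.", "http", "copyright"]

-- ===== PORT A =====
-- A: lowercase once, then 'any(m in t for m in noise_markers)'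
def is_noise (text : String) : Bool :=
  let t := PySem.Str.lower text
  noiseMarkers.any (fun m => PySem.Str.isIn m t)

-- ===== PORT B =====
-- B's scan: walk the lowered text position by position (suffix by suffix);
-- at each position test 't.startswith(m, i)' for every marker.
def noiseScan (cs : List Char) : Bool :=
  match cs with
  | [] => false
  | _ :: rest =>
      if noiseMarkers.any (fun m => PySem.Chars.startswith cs m.toList) then true
      else noiseScan rest

def is_noise_alt (text : String) : Bool :=
  let t := PySem.Str.lower text
  noiseScan t.toList

-- ===== PRECONDITION & SPEC =====
def Spec_is_noise (text : String) (out : Bool) : Prop := out = is_noise_alt text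
instance (text : String) (out : Bool) : Decidable (Spec_is_noise text out) := by unfold Spec_is_noise; infer_instance

-- ===== CLAIM (what is proved, stated in full; the proofs are below) =====
def Claim_equal_is_noise : Prop := ∀ (text : String), Dom_is_noise text → Spec_is_noise text (is_noise text)

-- ===== LEMMAS AND PROOFS =====

-- the scan finds a marker iff some marker occurs as an infix (all markers are nonempty)
theorem noiseScan_iff (cs : List Char) :
    noiseScan cs = true ↔ ∃ m ∈ noiseMarkers, m.toList <:+: cs := by
  induction cs with
  | nil =>
      simp only [noiseScan, List.infix_nil]
      constructor
      · intro h; cases h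
      · rintro ⟨m, hm, hnil⟩
        exfalso
        fin_cases hm <;> simp_all
  | cons c rest ih =>
      simp only [noiseScan]
      split_ifs with h
      · simp only [true_iff]
        rcases List.any_eq_true.mp h with ⟨m, hm, hsw⟩
        exact ⟨m, hm, List.IsPrefix.isInfix ((PySem.Chars.startswith_iff _ _).mp hsw)⟩
      · rw [ih]
        constructor
        · rintro ⟨m, hm, hinf⟩; exact ⟨m, hm, List.infix_cons hinf⟩
        · rintro ⟨m, hm, hinf⟩
          rcases List.infix_cons_iff.mp hinf with hpre | hinf'
          · exact absurd (List.any_eq_true.mpr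
              ⟨m, hm, (PySem.Chars.startswith_iff _ _).mpr hpre⟩) h
          · exact ⟨m, hm, hinf'⟩

-- ===== VERDICT (by name: the statement is the Claim_ definition above) =====
theorem is_noise_spec : Claim_equal_is_noise := by
  intro text _
  unfold Spec_is_noise is_noise is_noise_alt
  rw [Bool.eq_iff_iff, noiseScan_iff, List.any_eq_true]
  constructor <;> rintro ⟨m, hm, h⟩
  · exact ⟨m, hm, (PySem.Chars.isIn_iff_infix _ _).mp (by simpa using h)⟩
  · exact ⟨m, hm, by simpa using (PySem.Chars.isIn_iff_infix _ _).mpr h⟩
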